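-- pv_equiv track=rewrite | github.com/damonwang/random | sexpy/sexp_parse.py | lex
-- ===== SOURCE A (Python) =====
-- def lex(source):
--   acc = []
--   for c in source:
--     if c == ' ':
--       if acc != []: yield ''.join(acc)
--       acc = []
--     elif c in '()':
--       if acc != []: yield ''.join(acc)
--       yield c
--       acc = []
--     else: acc.append(c)
-- ===== SOURCE B (Python) =====
-- # B: delimiter-driven slicer: one pass over (index, char); each delimiter emits
-- # the slice of word characters since `start`, then the paren itself if any.
-- def lex(source):
--     start = 0
--     for i, c in enumerate(source):
--         if c in ' ()':
--             if start < i: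
--                 yield source[start:i]
--             if c != ' ':
--                 yield c
--             start = i + 1
-- ===== Notes on version B (the rewrite author's own statement) =====
-- stated objective: alternative
-- what changed: Replaces A's per-character accumulator state machine (append chars, join on flush) with a delimiter-driven slicer that tracks only a start index and emits each word as one slice source[start:i] when a delimiter is reached.
import Mathlib
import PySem

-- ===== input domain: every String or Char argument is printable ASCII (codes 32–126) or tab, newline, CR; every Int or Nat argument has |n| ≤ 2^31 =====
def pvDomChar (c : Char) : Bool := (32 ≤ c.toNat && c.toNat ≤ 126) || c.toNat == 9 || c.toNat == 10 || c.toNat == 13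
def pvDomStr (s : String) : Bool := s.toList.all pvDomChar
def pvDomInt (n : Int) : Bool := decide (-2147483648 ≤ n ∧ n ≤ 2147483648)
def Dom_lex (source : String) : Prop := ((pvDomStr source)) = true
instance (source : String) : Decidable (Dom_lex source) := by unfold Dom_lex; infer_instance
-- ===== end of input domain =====

-- B replaces A's per-character accumulator state machine with a delimiter-driven
-- slicer (start index + source[start:i] slices); same output, same cost.

-- ===== PORT A =====
-- A: per-character state machine: acc accumulates chars; ' ' flushes acc,
-- '(' / ')' flushes acc then yields itself; generator end drops a pending acc.
def lexGo : List Char → List Char → List String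
  | _acc, [] => []
  | acc, c :: rest =>
    if c = ' ' then
      (if acc = [] then [] else [String.ofList acc]) ++ lexGo [] rest
    else if c = '(' ∨ c = ')' then
      (if acc = [] then [] else [String.ofList acc]) ++ String.ofList [c] :: lexGo [] rest
    else
      lexGo (acc ++ [c]) rest

def lex (source : String) : List String := lexGo [] source.toList

-- ===== PORT B =====
-- B: fold over enumerate(source) with state (start, out); at each delimiter,
-- emit the slice source[start:i] if nonempty, then the paren itself if any.
def lexAltStep (cs : List Char) (st : Int × List String) (ic : Int × Char) : Int × List String :=
  if ic.2 = ' ' ∨ ic.2 = '(' ∨ ic.2 = ')' then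
    (ic.1 + 1,
      (st.2 ++ (if st.1 < ic.1 then [String.ofList (PySem.List.slice cs (some st.1) (some ic.1))] else []))
        ++ (if ic.2 = ' ' then [] else [String.ofList [ic.2]]))
  else st

def lex_alt (source : String) : List String :=
  ((PySem.List.enumerate source.toList 0).foldl (lexAltStep source.toList) (0, [])).2

-- ===== PRECONDITION & SPEC =====
def Spec_lex (source : String) (out : List String) : Prop := out = lex_alt source
instance (source : String) (out : List String) : Decidable (Spec_lex source out) := by unfold Spec_lex; infer_instance

-- ===== CLAIM (what is proved, stated in full; the proofs are below) =====
def Claim_equal_lex : Prop := ∀ (source : String), Dom_lex source → Spec_lex source (lex source)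

-- ===== LEMMAS AND PROOFS =====

theorem lex_loop (cs : List Char) (rest : List Char) (k s : Nat) (out : List String)
    (hrest : rest = cs.drop k) (hsk : s ≤ k) :
    ((PySem.List.enumerate rest (k : Int)).foldl (lexAltStep cs) ((s : Int), out)).2
      = out ++ lexGo ((cs.drop s).take (k - s)) rest := by
  induction rest generalizing k s out with
  | nil => simp [PySem.List.enumerate_nil, lexGo]
  | cons r rest' ih =>
    have hk : cs[k]? = some r := by
      rw [← List.head?_drop, ← hrest]; rfl
    have hrest' : rest' = cs.drop (k + 1) := by
      have := congrArg List.tail hrest.symm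
      simpa [List.tail_drop] using this.symm
    have hklen : k < cs.length := by
      by_contra h
      rw [List.getElem?_eq_none (by omega)] at hk; exact (by simp at hk)
    have hacclen : ((cs.drop s).take (k - s)).length = k - s := by
      simp [List.length_take, List.length_drop]; omega
    have haccnil : ((cs.drop s).take (k - s) = []) ↔ k = s := by
      rw [← List.length_eq_zero_iff, hacclen]; omega
    rw [PySem.List.enumerate_cons, List.foldl_cons]
    by_cases hsp : r = ' '
    · subst hsp
      have hstep : lexAltStep cs ((s : Int), out) ((k : Int), ' ')
          = (((k : Nat) : Int) + 1,
              out ++ (if s < k then [String.ofList ((cs.drop s).take (k - s))] else [])) := by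
        simp only [lexAltStep, PySem.List.slice_natCast]
        split_ifs with h1 h2 h2 <;> simp_all
      rw [hstep]
      have : ((k : Int) + 1) = (((k + 1 : Nat)) : Int) := by push_cast; ring
      rw [this]
      have := ih (k + 1) (k + 1)
        (out ++ (if s < k then [String.ofList ((cs.drop s).take (k - s))] else []))
        hrest' (le_refl _)
      rw [this]
      by_cases hsk' : s < k
      · have hne : ¬ ((cs.drop s).take (k - s) = []) := by rw [haccnil]; omega
        simp [lexGo, hsk', hne]
      · have heq : k = s := by omega
        simp [lexGo, hsk', haccnil.mpr heq]
    · by_cases hp : r = '(' ∨ r = ')'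
      · have hstep : lexAltStep cs ((s : Int), out) ((k : Int), r)
            = (((k : Nat) : Int) + 1,
                (out ++ (if s < k then [String.ofList ((cs.drop s).take (k - s))] else []))
                  ++ [String.ofList [r]]) := by
          simp only [lexAltStep, PySem.List.slice_natCast]
          rcases hp with h | h <;> subst h <;>
            (split_ifs with h1 h2 h2 <;> simp_all)
        rw [hstep]
        have : ((k : Int) + 1) = (((k + 1 : Nat)) : Int) := by push_cast; ring
        rw [this]
        have := ih (k + 1) (k + 1)
          ((out ++ (if s < k then [String.ofList ((cs.drop s).take (k - s))] else []))
            ++ [String.ofList [r]])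
          hrest' (le_refl _)
        rw [this]
        by_cases hsk' : s < k
        · have hne : ¬ ((cs.drop s).take (k - s) = []) := by rw [haccnil]; omega
          simp [lexGo, hsp, hp, hsk', hne]
        · have heq : k = s := by omega
          simp [lexGo, hsp, hp, hsk', haccnil.mpr heq]
      · have hstep : lexAltStep cs ((s : Int), out) ((k : Int), r) = ((s : Int), out) := by
          simp only [lexAltStep]
          have : ¬ (r = ' ' ∨ r = '(' ∨ r = ')') := by tauto
          simp [this]
        rw [hstep]
        have : ((k : Int) + 1) = (((k + 1 : Nat)) : Int) := by push_cast; ring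
        rw [this]
        have := ih (k + 1) s out hrest' (by omega)
        rw [this]
        have hacc' : (cs.drop s).take (k + 1 - s) = (cs.drop s).take (k - s) ++ [r] := by
          have h1 : k + 1 - s = (k - s) + 1 := by omega
          rw [h1, List.take_add_one]
          have : (cs.drop s)[k - s]? = some r := by
            rw [List.getElem?_drop]
            have : s + (k - s) = k := by omega
            rw [this]; exact hk
          simp [this]
        rw [hacc']
        simp [lexGo, hsp, hp]

-- ===== VERDICT (by name: the statement is the Claim_ definition above) =====
theorem lex_spec : Claim_equal_lex := by
  intro source _
  unfold Spec_lex lex lex_alt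
  simpa using (lex_loop source.toList source.toList 0 0 [] (by simp) (le_refl 0)).symm
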